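-- pv_equiv track=rewrite | github.com/MitsudoAI/mcp-style-agent | src/mcps/deep_thinking/config/flow_hot_update.py | _assess_compatibility
-- ===== SOURCE A (Python) =====
-- from typing import Any, Dict, List, Optional, Set, Tuple
--
-- def _assess_compatibility(changes: List[Dict[str, Any]]) -> str:
--     """Assess compatibility level"""
--     if not changes:
--         return "full"
--
--     breaking_changes = [change for change in changes if change.get("impact") == "breaking"]
--     if breaking_changes:
--         return "incompatible"
--
--     high_impact_changes = [change for change in changes if change.get("impact") == "high"]
--     if high_impact_changes:
--         return "partial"
--
--     return "full"
-- ===== SOURCE B (Python) =====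
-- def _assess_compatibility(changes):
--     """Assess compatibility level"""
--     rank = {"breaking": 2, "high": 1}
--     worst = 0
--     for change in changes:
--         worst = max(worst, rank.get(change.get("impact"), 0))
--     return ("full", "partial", "incompatible")[worst]
-- ===== Notes on version B (the rewrite author's own statement) =====
-- stated objective: alternative
-- what changed: Replaces A's empty-check plus two staged filtering scans with a single fold that reduces each change to a numeric severity rank (breaking=2, high=1, other=0), keeps the running maximum, and maps the final rank back to a level by tuple indexing.
import Mathlib
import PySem

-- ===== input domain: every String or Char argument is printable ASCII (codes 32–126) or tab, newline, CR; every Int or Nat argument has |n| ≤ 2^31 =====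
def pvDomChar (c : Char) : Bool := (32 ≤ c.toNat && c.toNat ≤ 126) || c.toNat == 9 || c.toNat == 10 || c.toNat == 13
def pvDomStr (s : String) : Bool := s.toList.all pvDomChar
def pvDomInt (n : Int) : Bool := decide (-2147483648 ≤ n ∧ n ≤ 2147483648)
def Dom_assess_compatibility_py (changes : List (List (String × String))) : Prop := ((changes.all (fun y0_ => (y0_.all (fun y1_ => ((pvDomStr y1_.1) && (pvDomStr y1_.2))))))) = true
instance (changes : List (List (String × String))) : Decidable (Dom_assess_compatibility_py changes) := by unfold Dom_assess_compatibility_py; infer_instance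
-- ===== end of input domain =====

-- B replaces A's empty-check plus two staged filtering scans with a single fold over a
-- numeric severity rank (max-accumulator), mapping the final rank back to a level; objective: alternative.

-- ===== PORT A =====
def assess_compatibility_py (changes : List (List (String × String))) : String :=
  if changes = [] then "full"
  else
    let breaking_changes := changes.filter (fun change => (PySem.Dict.mk change).get? "impact" == some "breaking")
    if breaking_changes ≠ [] then "incompatible"
    else
      let high_impact_changes := changes.filter (fun change => (PySem.Dict.mk change).get? "impact" == some "high")
      if high_impact_changes ≠ [] then "partial"
      else "full"

-- ===== PORT B =====
-- rank = {"breaking": 2, "high": 1}; lookup keys are change.get("impact") : Option String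
def pvRankDict : PySem.Dict (Option String) Int :=
  PySem.Dict.mk [(some "breaking", 2), (some "high", 1)]

def assess_compatibility_py_alt (changes : List (List (String × String))) : String :=
  let worst : Int :=
    changes.foldl (fun w change => max w (pvRankDict.getD ((PySem.Dict.mk change).get? "impact") 0)) 0
  -- ("full", "partial", "incompatible")[worst]; worst is always 0, 1 or 2
  if worst = 0 then "full" else if worst = 1 then "partial" else "incompatible"

-- ===== PRECONDITION & SPEC =====
def Spec_assess_compatibility_py (changes : List (List (String × String))) (out : String) : Prop := out = assess_compatibility_py_alt changes
instance (changes : List (List (String × String))) (out : String) : Decidable (Spec_assess_compatibility_py changes out) := by unfold Spec_assess_compatibility_py; infer_instance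

-- ===== CLAIM (what is proved, stated in full; the proofs are below) =====
def Claim_equal_assess_compatibility_py : Prop := ∀ (changes : List (List (String × String))), Dom_assess_compatibility_py changes → Spec_assess_compatibility_py changes (assess_compatibility_py changes)

-- ===== LEMMAS AND PROOFS =====

-- the per-change severity rank B's fold accumulates
def pvRank (change : List (String × String)) : Int :=
  pvRankDict.getD ((PySem.Dict.mk change).get? "impact") 0

theorem pvRank_eq (change : List (String × String)) :
    pvRank change =
      if (PySem.Dict.mk change).get? "impact" = some "breaking" then 2
      else if (PySem.Dict.mk change).get? "impact" = some "high" then 1 else 0 := by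
  unfold pvRank pvRankDict PySem.Dict.getD
  rcases h : (PySem.Dict.mk change).get? "impact" with _ | s
  · simp [PySem.Dict.get?]
  · by_cases hb : s = "breaking"
    · subst hb; simp [PySem.Dict.get?_mk_cons]
    · by_cases hh : s = "high"
      · subst hh; simp [PySem.Dict.get?_mk_cons]
      · simp [PySem.Dict.get?, Ne.symm hb, Ne.symm hh, hb, hh]

-- B's fold, characterised: it computes the worst rank present (0 if none)
theorem fold_worst_eq (changes : List (List (String × String))) (a : Int)
    (ha : a = 0 ∨ a = 1 ∨ a = 2) :
    changes.foldl (fun w change => max w (pvRank change)) a =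
      if a = 2 ∨ ∃ c ∈ changes, pvRank c = 2 then 2
      else if a = 1 ∨ ∃ c ∈ changes, pvRank c = 1 then 1
      else 0 := by
  induction changes generalizing a with
  | nil =>
    simp only [List.foldl_nil, List.not_mem_nil, false_and, exists_false, or_false]
    split_ifs <;> omega
  | cons c l ih =>
    have hrv : pvRank c = 0 ∨ pvRank c = 1 ∨ pvRank c = 2 := by
      rw [pvRank_eq]; split_ifs <;> simp
    rw [List.foldl_cons, ih (max a (pvRank c)) (by omega)]
    by_cases h2 : ∃ x ∈ l, pvRank x = 2 <;> by_cases h1 : ∃ x ∈ l, pvRank x = 1 <;>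
      simp only [List.mem_cons, exists_eq_or_imp, h1, h2, or_true, or_false] <;>
      rcases hrv with h|h|h <;> rcases ha with h'|h'|h' <;>
      rw [h, h'] <;> norm_num

-- A's filters, rephrased as existentials over pvRank
theorem filter_breaking_iff (changes : List (List (String × String))) :
    changes.filter (fun change => (PySem.Dict.mk change).get? "impact" == some "breaking") ≠ [] ↔
      ∃ c ∈ changes, pvRank c = 2 := by
  simp only [ne_eq, List.filter_eq_nil_iff, beq_iff_eq]
  push Not
  constructor
  · rintro ⟨c, hc, h⟩; exact ⟨c, hc, by rw [pvRank_eq, if_pos h]⟩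
  · rintro ⟨c, hc, h⟩; rw [pvRank_eq] at h
    refine ⟨c, hc, ?_⟩; by_contra hne; rw [if_neg hne] at h; split_ifs at h <;> omega

theorem filter_high_iff (changes : List (List (String × String))) :
    changes.filter (fun change => (PySem.Dict.mk change).get? "impact" == some "high") ≠ [] ↔
      ∃ c ∈ changes, pvRank c = 1 := by
  simp only [ne_eq, List.filter_eq_nil_iff, beq_iff_eq]
  push Not
  constructor
  · rintro ⟨c, hc, h⟩
    refine ⟨c, hc, ?_⟩; rw [pvRank_eq, h]
    simp
  · rintro ⟨c, hc, h⟩; rw [pvRank_eq] at h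
    refine ⟨c, hc, ?_⟩; split_ifs at h <;> omega

-- ===== VERDICT (by name: the statement is the Claim_ definition above) =====
theorem assess_compatibility_py_spec : Claim_equal_assess_compatibility_py := by
  intro changes _
  unfold Spec_assess_compatibility_py assess_compatibility_py assess_compatibility_py_alt
  have hfold := fold_worst_eq changes 0 (by omega)
  simp only [ne_eq, filter_breaking_iff, filter_high_iff]
  show _ = (if (changes.foldl (fun w change => max w (pvRank change)) 0) = 0 then "full"
    else if (changes.foldl (fun w change => max w (pvRank change)) 0) = 1 then "partial"
    else "incompatible")
  rw [hfold]
  split_ifs <;> first | rfl | (exfalso; aesop)
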